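-- pv_equiv track=rewrite | github.com/comp-phys-marc/python-interview-questions | main.py | matched_and_mismatched_words_helper
-- ===== SOURCE A (Python) =====
-- def matched_and_mismatched_words_helper(array1, array2):
--     matched = []
--     mismatched = []
--
--     for word in array1:  # check for word's membership in other array
--         if word in array2 and word not in matched:
--             matched.append(word)
--         elif word not in array2 and word not in mismatched:
--             mismatched.append(word)
--
--     return matched, mismatched
-- ===== SOURCE B (Python) =====
-- def matched_and_mismatched_words_helper(array1, array2):
--     unique = []
--     for w in array1:
--         if w not in unique:
--             unique.append(w)
--     matched = [w for w in unique if w in array2]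
--     mismatched = [w for w in unique if w not in array2]
--     return matched, mismatched
-- ===== Notes on version B (the rewrite author's own statement) =====
-- stated objective: simpler
-- what changed: B separates deduplication (one order-preserving dedup pass) from classification (two filter comprehensions over the deduped list), instead of A's single interleaved loop maintaining two growing lists with membership checks against them.
import Mathlib
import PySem

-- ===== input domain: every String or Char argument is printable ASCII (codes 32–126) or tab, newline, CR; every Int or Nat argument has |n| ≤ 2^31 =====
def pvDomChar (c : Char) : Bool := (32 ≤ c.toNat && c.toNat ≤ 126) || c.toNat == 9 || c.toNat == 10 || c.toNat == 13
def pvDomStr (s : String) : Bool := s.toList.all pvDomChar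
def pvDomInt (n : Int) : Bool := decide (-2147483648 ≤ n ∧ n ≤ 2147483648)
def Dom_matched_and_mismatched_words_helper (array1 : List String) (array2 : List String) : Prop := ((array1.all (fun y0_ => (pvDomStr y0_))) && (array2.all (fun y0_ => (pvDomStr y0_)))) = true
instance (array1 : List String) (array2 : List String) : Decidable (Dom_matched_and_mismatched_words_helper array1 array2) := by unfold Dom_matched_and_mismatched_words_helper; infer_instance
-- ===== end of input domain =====

-- B (objective: simpler): deduplicate array1 first, then classify the deduped list with two filters, instead of A's single interleaved loop; same cost, no speed claim.


-- ===== PORT A =====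
-- Literal port of A: one fold over array1 maintaining (matched, mismatched).
def matched_and_mismatched_words_helper (array1 : List String) (array2 : List String) : List String × List String :=
  array1.foldl (fun st word =>
    if array2.contains word && !st.1.contains word then (st.1 ++ [word], st.2)
    else if !array2.contains word && !st.2.contains word then (st.1, st.2 ++ [word])
    else st) ([], [])

-- ===== PORT B =====
-- B: dedup pass, then two filter passes.
def pvDedup (array1 : List String) : List String :=
  array1.foldl (fun u w => if u.contains w then u else u ++ [w]) []

def matched_and_mismatched_words_helper_alt (array1 : List String) (array2 : List String) : List String × List String :=
  ((pvDedup array1).filter (fun w => array2.contains w),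
   (pvDedup array1).filter (fun w => !array2.contains w))

-- ===== PRECONDITION & SPEC =====
def Spec_matched_and_mismatched_words_helper (array1 : List String) (array2 : List String) (out : List String × List String) : Prop := out = matched_and_mismatched_words_helper_alt array1 array2
instance (array1 : List String) (array2 : List String) (out : List String × List String) : Decidable (Spec_matched_and_mismatched_words_helper array1 array2 out) := by unfold Spec_matched_and_mismatched_words_helper; infer_instance

-- ===== CLAIM (what is proved, stated in full; the proofs are below) =====
def Claim_equal_matched_and_mismatched_words_helper : Prop := ∀ (array1 : List String) (array2 : List String), Dom_matched_and_mismatched_words_helper array1 array2 → Spec_matched_and_mismatched_words_helper array1 array2 (matched_and_mismatched_words_helper array1 array2)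

-- ===== LEMMAS AND PROOFS =====

lemma pv_step (a2 u : List String) (x : String) :
    (if a2.contains x && !(u.filter (fun w => a2.contains w)).contains x then
       (u.filter (fun w => a2.contains w) ++ [x], u.filter (fun w => !a2.contains w))
     else if !a2.contains x && !(u.filter (fun w => !a2.contains w)).contains x then
       (u.filter (fun w => a2.contains w), u.filter (fun w => !a2.contains w) ++ [x])
     else (u.filter (fun w => a2.contains w), u.filter (fun w => !a2.contains w)))
    = ((if u.contains x then u else u ++ [x]).filter (fun w => a2.contains w),
       (if u.contains x then u else u ++ [x]).filter (fun w => !a2.contains w)) := by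
  by_cases hx : x ∈ a2 <;> by_cases hu : x ∈ u <;>
    simp [List.mem_filter, List.filter_append, hx, hu]

lemma pv_key (a2 : List String) : ∀ (xs u : List String),
    xs.foldl (fun st word =>
      if a2.contains word && !st.1.contains word then (st.1 ++ [word], st.2)
      else if !a2.contains word && !st.2.contains word then (st.1, st.2 ++ [word])
      else st)
      (u.filter (fun w => a2.contains w), u.filter (fun w => !a2.contains w))
    = ((xs.foldl (fun v w => if v.contains w then v else v ++ [w]) u).filter (fun w => a2.contains w),
       (xs.foldl (fun v w => if v.contains w then v else v ++ [w]) u).filter (fun w => !a2.contains w)) := by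
  intro xs
  induction xs with
  | nil => intro u; rfl
  | cons x t ih =>
    intro u
    rw [List.foldl_cons, List.foldl_cons]
    dsimp only
    rw [pv_step a2 u x]
    exact ih (if u.contains x then u else u ++ [x])

-- ===== VERDICT (by name: the statement is the Claim_ definition above) =====
theorem matched_and_mismatched_words_helper_spec : Claim_equal_matched_and_mismatched_words_helper := by
  intro a1 a2 _
  show matched_and_mismatched_words_helper a1 a2 = matched_and_mismatched_words_helper_alt a1 a2
  unfold matched_and_mismatched_words_helper matched_and_mismatched_words_helper_alt pvDedup
  exact pv_key a2 a1 []
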